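-- pv_equiv track=rewrite | github.com/sivart213/impedance_analysis | testing/generators.py | slice_iter
-- ===== SOURCE A (Python) =====
-- import itertools
--
-- def slice_iter(iterable, n, total):
--     """Yield n items from iterable, then skip m items."""
--     m = total - n
--     if n <= 0 or m <= 0:
--         yield from iterable
--         return
--     it = iter(iterable)
--     while True:
--         yield from itertools.islice(it, n)
--         next_chunk = list(itertools.islice(it, m))
--         if len(next_chunk) < m:
--             break
-- ===== SOURCE B (Python) =====
-- def slice_iter(iterable, n, total):
--     """Yield n items from iterable, then skip m items."""
--     m = total - n
--     if n <= 0 or m <= 0: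
--         yield from iterable
--         return
--     for i, x in enumerate(iterable):
--         if i % total < n:
--             yield x
-- ===== Notes on version B (the rewrite author's own statement) =====
-- stated objective: simpler
-- what changed: Replaces the islice chunking loop (which materializes each skip-chunk into a list to test its length) with a single enumerate pass keeping one running index and yielding items whose position modulo total falls in the first n of each cycle.
import Mathlib
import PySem

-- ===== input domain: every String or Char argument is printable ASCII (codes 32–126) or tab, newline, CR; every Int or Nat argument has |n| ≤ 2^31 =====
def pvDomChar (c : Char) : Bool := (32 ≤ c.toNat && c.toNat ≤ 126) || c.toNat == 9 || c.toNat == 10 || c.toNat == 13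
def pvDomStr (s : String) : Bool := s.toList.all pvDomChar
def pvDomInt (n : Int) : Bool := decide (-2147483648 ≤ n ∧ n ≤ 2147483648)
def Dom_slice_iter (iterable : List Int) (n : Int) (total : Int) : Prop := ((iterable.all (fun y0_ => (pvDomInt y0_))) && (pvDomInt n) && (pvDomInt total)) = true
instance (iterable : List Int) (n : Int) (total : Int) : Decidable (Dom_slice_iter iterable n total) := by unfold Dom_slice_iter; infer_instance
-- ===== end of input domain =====

-- B replaces A's islice chunking loop with a single enumerate pass filtering by index modulo total (objective: simpler).


-- ===== PORT A =====
-- the `while True` loop: yield n items, collect the next m into a chunk, stop when the chunk is short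
-- (only reached with 0 < m, hence the proof argument used for termination)
def sliceChunkLoop (xs : List Int) (n m : Nat) (hm : 0 < m) : List Int :=
  if ((xs.drop n).take m).length < m then xs.take n
  else xs.take n ++ sliceChunkLoop ((xs.drop n).drop m) n m hm
termination_by xs.length
decreasing_by
  simp only [List.length_take, List.length_drop] at *
  omega

def slice_iter (iterable : List Int) (n : Int) (total : Int) : List Int :=
  if h : n ≤ 0 ∨ total - n ≤ 0 then iterable
  else sliceChunkLoop iterable n.toNat (total - n).toNat (by omega)

-- ===== PORT B =====
-- the `for i, x in enumerate(iterable)` loop of Source B, carrying the running index i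
def altGo (xs : List Int) (i n total : Int) : List Int :=
  match xs with
  | [] => []
  | x :: rest =>
      if PySem.Int.mod i total < n then x :: altGo rest (i + 1) n total
      else altGo rest (i + 1) n total

def slice_iter_alt (iterable : List Int) (n : Int) (total : Int) : List Int :=
  if n ≤ 0 ∨ total - n ≤ 0 then iterable
  else altGo iterable 0 n total

-- ===== PRECONDITION & SPEC =====
def Spec_slice_iter (iterable : List Int) (n : Int) (total : Int) (out : List Int) : Prop := out = slice_iter_alt iterable n total
instance (iterable : List Int) (n : Int) (total : Int) (out : List Int) : Decidable (Spec_slice_iter iterable n total out) := by unfold Spec_slice_iter; infer_instance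

-- ===== CLAIM (what is proved, stated in full; the proofs are below) =====
def Claim_equal_slice_iter : Prop := ∀ (iterable : List Int) (n : Int) (total : Int), Dom_slice_iter iterable n total → Spec_slice_iter iterable n total (slice_iter iterable n total)

-- ===== LEMMAS AND PROOFS =====

-- With a positive modulus, Python's mod of a natural-number index is plain Nat mod.
theorem altGo_cond (j : Nat) (n t : Int) (ht : 0 < t) :
    (PySem.Int.mod (j : Int) t < n) ↔ ((j % t.toNat : Nat) : Int) < n := by
  rw [PySem.Int.mod_eq_emod_of_pos ht]
  have h1 : ((j % t.toNat : Nat) : Int) = (j : Int) % t := by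
    push_cast
    rw [show ((t.toNat : Int)) = t by omega]
  rw [h1]

-- altGo on a cons cell with a natural-number index, rewritten through Nat mod
theorem altGo_nat (x : Int) (rest : List Int) (j : Nat) (n t : Int) (ht : 0 < t) :
    altGo (x :: rest) (j : Int) n t =
      if ((j % t.toNat : Nat) : Int) < n then x :: altGo rest ((j + 1 : Nat) : Int) n t
      else altGo rest ((j + 1 : Nat) : Int) n t := by
  simp only [altGo]
  rw [show ((j : Int) + 1) = ((j + 1 : Nat) : Int) by push_cast; ring]
  by_cases h : PySem.Int.mod (j : Int) t < n
  · rw [if_pos h, if_pos ((altGo_cond j n t ht).mp h)]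
  · rw [if_neg h, if_neg (fun hc => h ((altGo_cond j n t ht).mpr hc))]

-- periodicity: shifting the index by the modulus does not change the output
theorem altGo_period (xs : List Int) (j : Nat) (n t : Int) (ht : 0 < t) :
    altGo xs ((j + t.toNat : Nat) : Int) n t = altGo xs (j : Int) n t := by
  induction xs generalizing j with
  | nil => rfl
  | cons x rest ih =>
      rw [altGo_nat x rest _ n t ht, altGo_nat x rest j n t ht]
      rw [Nat.add_mod_right j t.toNat]
      have e : j + t.toNat + 1 = (j + 1) + t.toNat := by omega
      rw [e]
      rw [ih (j + 1)]

-- the first phase: from an index j ≤ n the next (n - j) elements are all yielded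
theorem altGo_take (xs : List Int) (j : Nat) (n t : Int) (hj : (j : Int) ≤ n)
    (hn : 0 < n) (hnt : n < t) :
    altGo xs (j : Int) n t =
      xs.take (n.toNat - j) ++ altGo (xs.drop (n.toNat - j)) ((n.toNat : Nat) : Int) n t := by
  induction xs generalizing j with
  | nil => simp [altGo]
  | cons x rest ih =>
      by_cases hje : (j : Int) = n
      · have h0 : n.toNat - j = 0 := by omega
        have h1 : ((n.toNat : Nat) : Int) = (j : Int) := by omega
        rw [h0, h1]
        simp
      · have hjlt : (j : Int) < n := lt_of_le_of_ne hj hje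
        rw [altGo_nat x rest j n t (by omega)]
        rw [Nat.mod_eq_of_lt (show j < t.toNat by omega)]
        rw [if_pos hjlt]
        rw [ih (j + 1) (by push_cast; omega)]
        rw [show n.toNat - j = (n.toNat - (j + 1)) + 1 by omega]
        simp [List.take_succ_cons, List.drop_succ_cons]

-- the second phase: from an index with n ≤ j ≤ t the next (t - j) elements are all skipped
theorem altGo_skip (xs : List Int) (j : Nat) (n t : Int) (hjl : n ≤ (j : Int))
    (hj : (j : Int) ≤ t) (hn : 0 < n) (hnt : n < t) :
    altGo xs (j : Int) n t = altGo (xs.drop (t.toNat - j)) ((t.toNat : Nat) : Int) n t := by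
  induction xs generalizing j with
  | nil => simp [altGo]
  | cons x rest ih =>
      by_cases hje : (j : Int) = t
      · have h0 : t.toNat - j = 0 := by omega
        have h1 : ((t.toNat : Nat) : Int) = (j : Int) := by omega
        rw [h0, h1]
        simp
      · have hjlt : (j : Int) < t := lt_of_le_of_ne hj hje
        rw [altGo_nat x rest j n t (by omega)]
        rw [Nat.mod_eq_of_lt (show j < t.toNat by omega)]
        rw [if_neg (by omega)]
        rw [ih (j + 1) (by push_cast; omega) (by push_cast; omega)]
        rw [show t.toNat - j = (t.toNat - (j + 1)) + 1 by omega]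
        simp [List.drop_succ_cons]

-- one full cycle of B's pass equals one iteration of A's chunk loop body
theorem altGo_cycle (xs : List Int) (n t : Int) (hn : 0 < n) (hnt : n < t) :
    altGo xs 0 n t =
      xs.take n.toNat ++ altGo ((xs.drop n.toNat).drop (t.toNat - n.toNat)) 0 n t := by
  have h0 : ((0 : Nat) : Int) = (0 : Int) := rfl
  rw [← h0, altGo_take xs 0 n t (by omega) hn hnt]
  simp only [Nat.sub_zero]
  rw [altGo_skip (xs.drop n.toNat) n.toNat n t (by omega) (by omega) hn hnt]
  have hp := altGo_period ((xs.drop n.toNat).drop (t.toNat - n.toNat)) 0 n t (by omega)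
  simp only [Nat.zero_add] at hp
  rw [hp, h0]

theorem chunkLoop_eq_altGo (xs : List Int) (n t : Int) (hn : 0 < n) (hnt : n < t) :
    sliceChunkLoop xs n.toNat (t - n).toNat (by omega) = altGo xs 0 n t := by
  induction hk : xs.length using Nat.strong_induction_on generalizing xs with
  | _ k ih =>
  rw [sliceChunkLoop.eq_def, altGo_cycle xs n t hn hnt]
  have hmt : (t - n).toNat = t.toNat - n.toNat := by omega
  by_cases hlen : ((xs.drop n.toNat).take (t - n).toNat).length < (t - n).toNat
  · rw [if_pos hlen]
    have hdrop : (xs.drop n.toNat).drop (t.toNat - n.toNat) = [] := by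
      apply List.drop_eq_nil_of_le
      simp only [List.length_take, List.length_drop] at hlen ⊢
      omega
    simp [hdrop, altGo]
  · rw [if_neg hlen]
    congr 1
    rw [← hmt]
    have hlt : ((xs.drop n.toNat).drop ((t - n).toNat)).length < k := by
      simp only [List.length_take, List.length_drop] at hlen ⊢
      omega
    exact ih _ hlt _ rfl

-- ===== VERDICT (by name: the statement is the Claim_ definition above) =====
theorem slice_iter_spec : Claim_equal_slice_iter := by
  intro iterable n total _
  unfold Spec_slice_iter
  simp only [slice_iter, slice_iter_alt]
  split_ifs with h
  · rfl
  · exact chunkLoop_eq_altGo iterable n total (by omega) (by omega)
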